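-- pv_equiv track=rewrite | github.com/NLPaladins/rinehartAnalysis_questionAnswering | proj1_nlp_libs/books/book_extractor.py | create_alias_occurrence_dictionary
-- ===== SOURCE A (Python) =====
-- def create_alias_occurrence_dictionary(aliases, named_occurrences):
--     new_named_occurrences = {}
--     for key in aliases.keys():
--         for named_occurrence in named_occurrences.keys():
--             if named_occurrence in aliases[key]:
--                 key_exists = key in new_named_occurrences.keys()
--                 occurrences = named_occurrences[named_occurrence]
--                 new_named_occurrences[key] = occurrences if not key_exists else new_named_occurrences[
--                                                                                     key] + occurrences
--
--     return new_named_occurrences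
-- ===== SOURCE B (Python) =====
-- def create_alias_occurrence_dictionary(aliases, named_occurrences):
--     # reverse index: alias name -> alias keys (in aliases order, unique per name)
--     reverse_index = {}
--     for key, names in aliases.items():
--         for name in dict.fromkeys(names):
--             reverse_index.setdefault(name, []).append(key)
--     buckets = {}
--     for name, occurrences in named_occurrences.items():
--         for key in reverse_index.get(name, ()):
--             buckets[key] = buckets.get(key, []) + occurrences
--     return {key: buckets[key] for key in aliases if key in buckets}
-- ===== Notes on version B (the rewrite author's own statement) =====
-- stated objective: faster
-- what changed: Replaces A's nested scan over every (alias key, occurrence name) pair with a list-membership test inside by a reverse index alias-name->keys built once, a single accumulating pass over named_occurrences, and a final re-ordering by alias key order.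
import Mathlib
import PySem

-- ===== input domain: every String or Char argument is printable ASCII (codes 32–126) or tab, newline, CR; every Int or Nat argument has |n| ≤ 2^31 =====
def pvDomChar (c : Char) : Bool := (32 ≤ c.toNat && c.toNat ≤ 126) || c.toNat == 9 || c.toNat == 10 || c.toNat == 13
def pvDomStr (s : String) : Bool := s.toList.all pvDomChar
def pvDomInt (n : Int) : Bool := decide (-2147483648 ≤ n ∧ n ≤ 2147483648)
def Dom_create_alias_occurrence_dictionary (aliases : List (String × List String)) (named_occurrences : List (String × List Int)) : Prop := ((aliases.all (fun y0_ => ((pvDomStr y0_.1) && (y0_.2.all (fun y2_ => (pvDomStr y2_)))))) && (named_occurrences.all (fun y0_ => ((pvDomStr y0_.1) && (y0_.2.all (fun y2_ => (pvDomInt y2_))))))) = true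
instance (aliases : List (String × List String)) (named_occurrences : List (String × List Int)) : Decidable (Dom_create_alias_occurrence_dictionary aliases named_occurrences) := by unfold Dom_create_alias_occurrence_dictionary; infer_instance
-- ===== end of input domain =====

-- B replaces A's nested scan over all (alias key, occurrence name) pairs by a reverse index
-- name → alias keys and a single accumulating pass over named_occurrences (equal return value).

-- ===== PORT A =====
-- literal transliteration of A: for key in aliases.keys(): for name in named_occurrences.keys(): …
-- (key ∈ aliases.keys() and name ∈ named_occurrences.keys(), so the subscripts are exact as getD)
def create_alias_occurrence_dictionary (aliases : List (String × List String)) (named_occurrences : List (String × List Int)) : List (String × List Int) :=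
  let aD := PySem.Dict.ofList aliases
  let nD := PySem.Dict.ofList named_occurrences
  (aD.keys.foldl (fun nno key =>
      nD.keys.foldl (fun nno name =>
        if (aD.getD key []).contains name then
          let key_exists := nno.contains key
          let occurrences := nD.getD name []
          nno.insert key (if !key_exists then occurrences else nno.getD key [] ++ occurrences)
        else nno) nno) PySem.Dict.empty).items

-- ===== PORT B =====
-- transliteration of Source B: reverse index, one accumulating pass, then re-order by aliases' key order
def create_alias_occurrence_dictionary_alt (aliases : List (String × List String)) (named_occurrences : List (String × List Int)) : List (String × List Int) :=
  let aD := PySem.Dict.ofList aliases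
  let nD := PySem.Dict.ofList named_occurrences
  let reverse_index : PySem.Dict String (List String) :=
    aD.items.foldl (fun rev kv =>
      (PySem.List.dedup kv.2).foldl (fun rev name =>
        rev.insert name (rev.getD name [] ++ [kv.1])) rev) PySem.Dict.empty
  let buckets : PySem.Dict String (List Int) :=
    nD.items.foldl (fun b nv =>
      (reverse_index.getD nv.1 []).foldl (fun b key =>
        b.insert key (b.getD key [] ++ nv.2)) b) PySem.Dict.empty
  aD.keys.foldl (fun out key =>
    if buckets.contains key then out ++ [(key, buckets.getD key [])] else out) []

-- ===== PRECONDITION & SPEC =====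
def Spec_create_alias_occurrence_dictionary (aliases : List (String × List String)) (named_occurrences : List (String × List Int)) (out : List (String × List Int)) : Prop := out = create_alias_occurrence_dictionary_alt aliases named_occurrences
instance (aliases : List (String × List String)) (named_occurrences : List (String × List Int)) (out : List (String × List Int)) : Decidable (Spec_create_alias_occurrence_dictionary aliases named_occurrences out) := by unfold Spec_create_alias_occurrence_dictionary; infer_instance

-- ===== CLAIM (what is proved, stated in full; the proofs are below) =====
def Claim_equal_create_alias_occurrence_dictionary : Prop := ∀ (aliases : List (String × List String)) (named_occurrences : List (String × List Int)), Dom_create_alias_occurrence_dictionary aliases named_occurrences → Spec_create_alias_occurrence_dictionary aliases named_occurrences (create_alias_occurrence_dictionary aliases named_occurrences)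

-- ===== LEMMAS AND PROOFS =====

-- the occurrences accumulated for one alias key: all occurrence lists whose name is in the key's alias list
def pvMatchVal (av : List String) (nits : List (String × List Int)) : List Int :=
  ((nits.filter (fun p => av.contains p.1)).map (·.2)).flatten

-- A's inner-loop body, rewritten on named_occurrences.items
def pvStepA (key : String) (av : List String) (nno : PySem.Dict String (List Int)) (p : String × List Int) : PySem.Dict String (List Int) :=
  if av.contains p.1 then
    nno.insert key (if !nno.contains key then p.2 else nno.getD key [] ++ p.2)
  else nno

theorem pvMatchVal_cons_pos {av : List String} {p : String × List Int} {nits : List (String × List Int)}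
    (h : av.contains p.1 = true) : pvMatchVal av (p :: nits) = p.2 ++ pvMatchVal av nits := by
  have h' : p.1 ∈ av := by simpa using h
  simp [pvMatchVal, h']

theorem pvMatchVal_cons_neg {av : List String} {p : String × List Int} {nits : List (String × List Int)}
    (h : av.contains p.1 = false) : pvMatchVal av (p :: nits) = pvMatchVal av nits := by
  have h' : ¬ p.1 ∈ av := by simpa using h
  simp [pvMatchVal, h']

theorem pv_get?_mk_append (front : List (String × List Int)) (k : String) (v : List Int)
    (h : (front.map (·.1)).contains k = false) :
    (PySem.Dict.mk (front ++ [(k, v)])).get? k = some v := by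
  induction front with
  | nil => simp [PySem.Dict.get?_mk_cons]
  | cons q front ih =>
      simp only [List.map_cons, List.contains_cons] at h
      rw [List.cons_append, PySem.Dict.get?_mk_cons]
      have h1 : (q.1 == k) = false := by
        cases hq : q.1 == k <;> simp_all
      simp [h1, ih (by cases hc : (front.map (·.1)).contains k <;> simp_all)]

theorem pv_contains_keys {ν : Type} (d : PySem.Dict String ν) (k : String) :
    (d.items.map (fun x => x.1)).contains k = d.contains k := by
  rw [PySem.Dict.contains]
  cases hc : (d.items.any fun p => p.1 == k) <;>
    simp_all [List.mem_map, List.any_eq_true]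
  exact fun x hx => hc k x hx rfl

theorem pv_insert_mk_append (front : List (String × List Int)) (k : String) (v w : List Int)
    (h : (front.map (·.1)).contains k = false) :
    (PySem.Dict.mk (front ++ [(k, v)])).insert k w = PySem.Dict.mk (front ++ [(k, w)]) := by
  have hc : (PySem.Dict.mk (front ++ [(k, v)])).contains k = true := by
    rw [PySem.Dict.contains_mk]; simp
  apply PySem.Dict.ext
  rw [PySem.Dict.items_insert_of_contains _ _ hc]
  have hfr : ∀ p ∈ front, (p.1 == k) = false := by
    intro p hp
    cases hq : p.1 == k
    · rfl
    · exfalso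
      have : p.1 = k := by simpa using hq
      have : k ∈ front.map (·.1) := List.mem_map.mpr ⟨p, hp, this⟩
      simp [this] at h
  show (front ++ [(k, v)]).map _ = front ++ [(k, w)]
  rw [List.map_append]
  congr 1
  · calc front.map (fun p => if (p.1 == k) = true then (k, w) else p)
        = front.map id := List.map_congr_left (fun p hp => by simp [hfr p hp])
      _ = front := List.map_id front
  · simp

theorem pv_stepA_phase2 (nits : List (String × List Int)) :
    ∀ (front : List (String × List Int)) (key : String) (v : List Int) (av : List String),
    (front.map (·.1)).contains key = false →
    nits.foldl (pvStepA key av) (PySem.Dict.mk (front ++ [(key, v)]))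
      = PySem.Dict.mk (front ++ [(key, v ++ pvMatchVal av nits)]) := by
  induction nits with
  | nil => intro front key v av h; simp [pvMatchVal]
  | cons p nits ih =>
      intro front key v av h
      rw [List.foldl_cons]
      by_cases hp : av.contains p.1 = true
      · have hc : (PySem.Dict.mk (front ++ [(key, v)])).contains key = true := by
          rw [PySem.Dict.contains_mk]; simp
        have hget : (PySem.Dict.mk (front ++ [(key, v)])).getD key [] = v := by
          rw [PySem.Dict.getD_eq_get?_getD, pv_get?_mk_append _ _ _ h]; rfl
        have hstep : pvStepA key av (PySem.Dict.mk (front ++ [(key, v)])) p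
            = PySem.Dict.mk (front ++ [(key, v ++ p.2)]) := by
          rw [pvStepA, if_pos hp, hc, hget]
          simpa using pv_insert_mk_append front key v (v ++ p.2) h
        rw [hstep, ih front key (v ++ p.2) av h, pvMatchVal_cons_pos hp, List.append_assoc]
      · have hp' : av.contains p.1 = false := by simpa using hp
        have hstep : pvStepA key av (PySem.Dict.mk (front ++ [(key, v)])) p
            = PySem.Dict.mk (front ++ [(key, v)]) := by
          rw [pvStepA, if_neg (by simpa using hp')]
        rw [hstep, ih front key v av h, pvMatchVal_cons_neg hp']

theorem pv_stepA_phase1 (nits : List (String × List Int)) :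
    ∀ (d : PySem.Dict String (List Int)) (key : String) (av : List String),
    d.contains key = false →
    (nits.foldl (pvStepA key av) d).items
      = d.items ++ (if nits.any (fun p => av.contains p.1) then [(key, pvMatchVal av nits)] else []) := by
  induction nits with
  | nil => intro d key av h; simp
  | cons p nits ih =>
      intro d key av h
      rw [List.foldl_cons]
      by_cases hp : av.contains p.1 = true
      · have hstep : pvStepA key av d p = PySem.Dict.mk (d.items ++ [(key, p.2)]) := by
          apply PySem.Dict.ext
          rw [pvStepA, if_pos hp, h]
          simpa using PySem.Dict.items_insert_of_not_contains d p.2 h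
        have hk : (d.items.map (fun x => x.1)).contains key = false := by
          rw [pv_contains_keys]; exact h
        rw [hstep, pv_stepA_phase2 nits d.items key p.2 av hk,
            pvMatchVal_cons_pos hp, List.any_cons, hp]
        simp
      · have hp' : av.contains p.1 = false := by simpa using hp
        have hstep : pvStepA key av d p = d := by
          rw [pvStepA, if_neg (by simpa using hp')]
        rw [hstep, ih d key av h, pvMatchVal_cons_neg hp', List.any_cons, hp',
            Bool.false_or]

theorem pv_outerA (ks : List String) (nits : List (String × List Int)) (f : String → List String) :
    ∀ (d : PySem.Dict String (List Int)), ks.Nodup → (∀ k ∈ ks, d.contains k = false) →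
    (ks.foldl (fun nno k => nits.foldl (pvStepA k (f k)) nno) d).items
      = d.items ++ (ks.filter (fun k => nits.any (fun p => (f k).contains p.1))).map
          (fun k => (k, pvMatchVal (f k) nits)) := by
  induction ks with
  | nil => intro d _ _; simp
  | cons k ks ih =>
      intro d hnd hfresh
      obtain ⟨hk, hnd'⟩ := List.nodup_cons.mp hnd
      rw [List.foldl_cons]
      have h1 := pv_stepA_phase1 nits d k (f k) (hfresh k (by simp))
      have hfresh' : ∀ k' ∈ ks, (nits.foldl (pvStepA k (f k)) d).contains k' = false := by
        intro k' hk'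
        have hne : k' ≠ k := fun e => hk (e ▸ hk')
        have hdk' : k' ∉ d.items.map (fun x => x.1) := by
          have := hfresh k' (by simp [hk'])
          rw [← pv_contains_keys] at this
          simpa [List.contains_iff_mem] using this
        rw [← pv_contains_keys, h1]
        by_cases hb : (nits.any fun p => (f k).contains p.1) = true
        · rw [if_pos hb]
          simp [hdk', hne]
        · rw [if_neg hb]
          simp [hdk']
      rw [ih _ hnd' hfresh', h1, List.filter_cons]
      by_cases hb : (nits.any fun p => (f k).contains p.1) = true
      · rw [if_pos hb, if_pos hb, List.map_cons]
        simp
      · rw [if_neg hb, if_neg hb]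
        simp

theorem pv_appendLoop_getD {ν : Type} (names : List String) :
    ∀ (d : PySem.Dict String (List ν)) (v : List ν) (n : String), names.Nodup →
    (names.foldl (fun d m => d.insert m (d.getD m [] ++ v)) d).getD n []
      = d.getD n [] ++ (if names.contains n then v else []) := by
  induction names with
  | nil => intro d v n _; simp
  | cons m names ih =>
      intro d v n hnd
      obtain ⟨hm, hnd'⟩ := List.nodup_cons.mp hnd
      rw [List.foldl_cons, ih _ _ _ hnd', PySem.Dict.getD_insert]
      by_cases he : n = m
      · subst he
        have hcf : names.contains n = false := by
          simpa [List.contains_iff_mem] using hm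
        rw [hcf, if_pos rfl, if_neg (by simp), List.contains_cons]
        simp
      · rw [if_neg he, List.contains_cons]
        have : (n == m) = false := by simpa using he
        rw [this, Bool.false_or]

theorem pv_appendLoop_contains {ν : Type} (names : List String) :
    ∀ (d : PySem.Dict String (List ν)) (v : List ν) (k : String),
    (names.foldl (fun d m => d.insert m (d.getD m [] ++ v)) d).contains k
      = (d.contains k || names.contains k) := by
  induction names with
  | nil => intro d v k; simp
  | cons m names ih =>
      intro d v k
      rw [List.foldl_cons, ih, PySem.Dict.contains_insert, List.contains_cons]
      cases hq : k == m <;> cases hd : d.contains k <;> simp_all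

theorem pv_revSpec (its : List (String × List String)) :
    ∀ (rev : PySem.Dict String (List String)) (n : String),
    (its.foldl (fun rev kv =>
        (PySem.List.dedup kv.2).foldl (fun rev name =>
          rev.insert name (rev.getD name [] ++ [kv.1])) rev) rev).getD n []
      = rev.getD n [] ++ (its.filter (fun kv => kv.2.contains n)).map (·.1) := by
  induction its with
  | nil => intro rev n; simp
  | cons kv its ih =>
      intro rev n
      rw [List.foldl_cons, ih, pv_appendLoop_getD _ _ _ _ (PySem.List.nodup_dedup kv.2)]
      have hdd : (PySem.List.dedup kv.2).contains n = kv.2.contains n := by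
        cases hc : kv.2.contains n <;> simp_all
      rw [hdd, List.filter_cons]
      by_cases hb : kv.2.contains n = true
      · rw [if_pos hb, if_pos hb, List.map_cons]
        simp
      · rw [if_neg hb, if_neg hb]
        simp

theorem pv_bucketsSpec_getD (nits : List (String × List Int)) (g : String → List String)
    (hg : ∀ n, (g n).Nodup) :
    ∀ (b : PySem.Dict String (List Int)) (k : String),
    (nits.foldl (fun b nv =>
        (g nv.1).foldl (fun b key => b.insert key (b.getD key [] ++ nv.2)) b) b).getD k []
      = b.getD k [] ++ ((nits.filter (fun nv => (g nv.1).contains k)).map (·.2)).flatten := by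
  induction nits with
  | nil => intro b k; simp
  | cons nv nits ih =>
      intro b k
      rw [List.foldl_cons, ih, pv_appendLoop_getD _ _ _ _ (hg nv.1), List.filter_cons]
      by_cases hb : (g nv.1).contains k = true
      · rw [if_pos hb, if_pos hb, List.map_cons, List.flatten_cons]
        simp
      · rw [if_neg hb, if_neg hb]
        simp

theorem pv_bucketsSpec_contains (nits : List (String × List Int)) (g : String → List String) :
    ∀ (b : PySem.Dict String (List Int)) (k : String),
    (nits.foldl (fun b nv =>
        (g nv.1).foldl (fun b key => b.insert key (b.getD key [] ++ nv.2)) b) b).contains k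
      = (b.contains k || nits.any (fun nv => (g nv.1).contains k)) := by
  induction nits with
  | nil => intro b k; simp
  | cons nv nits ih =>
      intro b k
      rw [List.foldl_cons, ih, pv_appendLoop_contains, List.any_cons, Bool.or_assoc]

theorem pv_cross (d : PySem.Dict String (List String)) (hn : d.keys.Nodup) (k : String)
    (hk : d.contains k = true) (n : String) :
    ((d.items.filter (fun kv => kv.2.contains n)).map (·.1)).contains k
      = (d.getD k []).contains n := by
  rw [PySem.Dict.contains_eq_isSome_get?] at hk
  obtain ⟨v, hv⟩ := Option.isSome_iff_exists.mp hk
  have hmem : (k, v) ∈ d.items := PySem.Dict.mem_items_of_get?_eq_some d hv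
  have hgd : d.getD k [] = v := by rw [PySem.Dict.getD_eq_get?_getD, hv]; rfl
  rw [hgd]
  cases hvn : v.contains n
  · cases hL : ((d.items.filter (fun kv => kv.2.contains n)).map (·.1)).contains k
    · rfl
    · exfalso
      have hkm : k ∈ (d.items.filter (fun kv => kv.2.contains n)).map (·.1) := by
        simpa [List.contains_iff_mem] using hL
      obtain ⟨kv, hkvf, hkv1⟩ := List.mem_map.mp hkm
      have hkvm : (kv.1, kv.2) ∈ d.items := by
        simpa using List.mem_of_mem_filter hkvf
      have hkvp : kv.2.contains n = true := by
        have := List.mem_filter.mp hkvf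
        exact this.2
      have hq : d.get? kv.1 = some kv.2 := PySem.Dict.get?_of_mem_items d hkvm hn
      rw [hkv1, hv] at hq
      rw [Option.some_inj.mp hq] at hvn
      rw [hvn] at hkvp
      exact Bool.false_ne_true hkvp
  · have : k ∈ (d.items.filter (fun kv => kv.2.contains n)).map (·.1) :=
      List.mem_map.mpr ⟨(k, v), List.mem_filter.mpr ⟨hmem, hvn⟩, rfl⟩
    simpa [List.contains_iff_mem] using this

-- ===== VERDICT (by name: the statement is the Claim_ definition above) =====
theorem create_alias_occurrence_dictionary_spec : Claim_equal_create_alias_occurrence_dictionary := by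
  intro aliases named_occurrences _
  show create_alias_occurrence_dictionary aliases named_occurrences
      = create_alias_occurrence_dictionary_alt aliases named_occurrences
  set aD := PySem.Dict.ofList aliases with haD
  set nD := PySem.Dict.ofList named_occurrences with hnD
  have hndA : aD.keys.Nodup := PySem.Dict.nodup_keys_ofList aliases
  have hndN : nD.keys.Nodup := PySem.Dict.nodup_keys_ofList named_occurrences
  -- A's inner loop over named_occurrences.keys() is the same loop over .items
  have hinner : ∀ (k : String) (nno : PySem.Dict String (List Int)),
      nD.keys.foldl (fun nno name =>
        if (aD.getD k []).contains name then
          nno.insert k (if !nno.contains k then nD.getD name []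
                        else nno.getD k [] ++ nD.getD name [])
        else nno) nno
      = nD.items.foldl (pvStepA k (aD.getD k [])) nno := by
    intro k nno
    simp only [PySem.Dict.keys]
    rw [List.foldl_map]
    refine PySem.List.foldl_congr_mem _ _ _ _ ?_
    intro acc p hp
    have hv : nD.getD p.1 [] = p.2 :=
      PySem.Dict.getD_of_mem_items nD (by simpa using hp) hndN []
    simp [pvStepA, hv]
  have hA : create_alias_occurrence_dictionary aliases named_occurrences
      = (aD.keys.filter (fun k => nD.items.any fun p => (aD.getD k []).contains p.1)).map
          (fun k => (k, pvMatchVal (aD.getD k []) nD.items)) := by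
    unfold create_alias_occurrence_dictionary
    rw [← haD, ← hnD]
    dsimp only
    have hcongr := PySem.List.foldl_congr_mem aD.keys
      (fun nno key => nD.keys.foldl (fun nno name =>
        if (aD.getD key []).contains name then
          nno.insert key (if !nno.contains key then nD.getD name []
                          else nno.getD key [] ++ nD.getD name [])
        else nno) nno)
      (fun nno key => nD.items.foldl (pvStepA key (aD.getD key [])) nno)
      PySem.Dict.empty (fun acc k _ => hinner k acc)
    rw [hcongr, pv_outerA aD.keys nD.items (fun k => aD.getD k []) PySem.Dict.empty hndA
          (fun k _ => by simp)]
    simp [PySem.Dict.empty]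
  have hB : create_alias_occurrence_dictionary_alt aliases named_occurrences
      = (aD.keys.filter (fun k => nD.items.any fun p => (aD.getD k []).contains p.1)).map
          (fun k => (k, pvMatchVal (aD.getD k []) nD.items)) := by
    unfold create_alias_occurrence_dictionary_alt
    rw [← haD, ← hnD]
    dsimp only
    set revD := aD.items.foldl (fun rev kv =>
      (PySem.List.dedup kv.2).foldl (fun rev name =>
        rev.insert name (rev.getD name [] ++ [kv.1])) rev) PySem.Dict.empty with hrevD
    set buckets := nD.items.foldl (fun b nv =>
      (revD.getD nv.1 []).foldl (fun b key => b.insert key (b.getD key [] ++ nv.2)) b)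
      PySem.Dict.empty with hbuckets
    have hrev : ∀ n : String,
        revD.getD n [] = (aD.items.filter (fun kv => kv.2.contains n)).map (·.1) := by
      intro n
      rw [hrevD, pv_revSpec]
      simp
    have hgnd : ∀ n : String, (revD.getD n []).Nodup := by
      intro n
      rw [hrev n]
      have hsub : ((aD.items.filter (fun kv => kv.2.contains n)).map (·.1)).Sublist
          (aD.items.map (fun x => x.1)) := by exact List.Sublist.map _ List.filter_sublist
      exact ((by simpa [PySem.Dict.keys] using hndA : (aD.items.map (fun x => x.1)).Nodup)).sublist hsub
    have hcross : ∀ k, k ∈ aD.keys → ∀ n : String,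
        (revD.getD n []).contains k = (aD.getD k []).contains n := by
      intro k hk n
      have hk' : aD.contains k = true := by
        rw [PySem.Dict.contains_eq_decide_mem_keys]
        simpa using hk
      rw [hrev n, pv_cross aD hndA k hk' n]
    have hcont : ∀ k ∈ aD.keys,
        buckets.contains k = (nD.items.any fun p => (aD.getD k []).contains p.1) := by
      intro k hk
      rw [hbuckets, pv_bucketsSpec_contains nD.items (fun n => revD.getD n []) PySem.Dict.empty k]
      rw [show PySem.Dict.empty.contains k = false from by simp, Bool.false_or]
      exact PySem.List.any_congr_mem (fun p _ => hcross k hk p.1)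
    have hval : ∀ k ∈ aD.keys, buckets.getD k [] = pvMatchVal (aD.getD k []) nD.items := by
      intro k hk
      rw [hbuckets, pv_bucketsSpec_getD nD.items (fun n => revD.getD n []) hgnd PySem.Dict.empty k]
      rw [show (PySem.Dict.empty : PySem.Dict String (List Int)).getD k [] = [] from by simp,
          List.nil_append, pvMatchVal,
          List.filter_congr (fun p (_ : p ∈ nD.items) => hcross k hk p.1)]
    rw [PySem.List.foldl_append_if (fun k => buckets.contains k)
          (fun k => (k, buckets.getD k [])) aD.keys []]
    rw [List.nil_append, List.filter_congr hcont]
    apply List.map_congr_left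
    intro k hk
    rw [hval k (List.mem_of_mem_filter hk)]
  rw [hA, hB]
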